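-- pv_equiv track=rewrite | github.com/TimberZZ/Sentiment-Analyse | utils/DocAnalyzer.py | extract_location_with_list
-- ===== SOURCE A (Python) =====
-- def extract_location_with_list(chapter, location_set):
--
--     title = chapter[0]
--     paragraphs = chapter[1:]
--     entities = [([entity for entity in location_set if entity in paragraph], paragraph) for paragraph in paragraphs]
--     entities = [pair for pair in entities if len(pair[0]) != 0]
--
--     connections = {}
--     for pair in entities:
--         entity = set(pair[0])
--         if len(entity) <= 1:
--             continue
--         entity = list(entity)
--         for ind in range(0, len(entity)):
--             for other_ind in range(ind + 1, len(entity)):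
--                 a = entity[ind]
--                 b = entity[other_ind]
--                 if a not in connections:
--                     connections[a] = {}
--                 if b not in connections[a]:
--                     connections[a][b] = 0
--                 connections[a][b] += 1
--
--                 if b not in connections:
--                     connections[b] = {}
--                 if a not in connections[b]:
--                     connections[b][a] = 0
--                 connections[b][a] += 1
--
--     return connections
-- ===== SOURCE B (Python) =====
-- def extract_location_with_list(chapter, location_set):
--     # Deduplicate the location list once, keeping first occurrences.
--     seen = []
--     for e in location_set:
--         if e not in seen:
--             seen.append(e)
--
--     # Phase 1: one flat counter over unordered entity pairs per paragraph.
--     pair_counts = {}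
--     for paragraph in chapter[1:]:
--         rest = [e for e in seen if e in paragraph]
--         while rest:
--             a = rest[0]
--             rest = rest[1:]
--             for b in rest:
--                 pair_counts[(a, b)] = pair_counts.get((a, b), 0) + 1
--
--     # Phase 2: materialize the symmetric nested dictionary from the counter.
--     connections = {}
--     for (a, b), count in pair_counts.items():
--         inner_a = connections.get(a, {})
--         inner_a[b] = count
--         connections[a] = inner_a
--         inner_b = connections.get(b, {})
--         inner_b[a] = count
--         connections[b] = inner_b
--     return connections
-- ===== Notes on version B (the rewrite author's own statement) =====
-- stated objective: alternative
-- what changed: B deduplicates the location list once up front and counts each unordered entity pair in a single flat tuple-keyed counter, then symmetrizes it into the nested dict in one final pass, instead of A's per-paragraph set() rebuilds and incremental double updates of nested dicts.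
import Mathlib
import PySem

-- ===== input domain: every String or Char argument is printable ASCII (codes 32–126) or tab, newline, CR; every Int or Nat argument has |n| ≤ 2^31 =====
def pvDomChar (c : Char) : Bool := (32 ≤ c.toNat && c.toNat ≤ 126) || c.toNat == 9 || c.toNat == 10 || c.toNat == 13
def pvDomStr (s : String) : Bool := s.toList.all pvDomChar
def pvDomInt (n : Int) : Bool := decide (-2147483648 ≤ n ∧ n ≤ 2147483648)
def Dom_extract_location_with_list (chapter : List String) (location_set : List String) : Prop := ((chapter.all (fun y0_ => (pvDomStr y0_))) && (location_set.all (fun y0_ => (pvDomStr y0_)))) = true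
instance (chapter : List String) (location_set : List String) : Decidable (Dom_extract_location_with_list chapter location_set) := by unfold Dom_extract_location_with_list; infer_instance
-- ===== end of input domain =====

-- B replaces A's incremental nested-dict double-counting with a dedup-once, flat unordered-pair
-- counter that is symmetrized into the nested dict in one final pass (objective: alternative).

-- ===== PORT A =====
def extract_location_with_list (chapter : List String) (location_set : List String) : List (String × List (String × Int)) :=
  let _title := PySem.List.pyGet? chapter 0   -- chapter[0]; IndexError on [] (excluded by Pre_), value unused
  let paragraphs := PySem.List.slice chapter (some 1) none
  let entities := paragraphs.map (fun paragraph =>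
    (location_set.filter (fun entity => PySem.Str.isIn entity paragraph), paragraph))
  let entities := entities.filter (fun pair => pair.1.length != 0)
  let connections : PySem.Dict String (PySem.Dict String Int) :=
    entities.foldl (fun connections pair =>
      let entity : PySem.Set String := PySem.Set.ofList pair.1
      if entity.length ≤ 1 then connections else
      (PySem.List.pyRange 0 (entity.length : Int) 1).foldl (fun connections ind =>
        (PySem.List.pyRange (ind + 1) (entity.length : Int) 1).foldl (fun connections other_ind =>
          let a := PySem.List.pyGetD entity ind ""
          let b := PySem.List.pyGetD entity other_ind ""
          let da := connections.getD a PySem.Dict.empty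
          let connections := connections.insert a (da.insert b (da.getD b 0 + 1))
          let db := connections.getD b PySem.Dict.empty
          connections.insert b (db.insert a (db.getD a 0 + 1))) connections) connections)
      PySem.Dict.empty
  connections.items.map (fun p => (p.1, p.2.items))

-- ===== PORT B =====
-- 'while rest: a, rest = rest[0], rest[1:]; for b in rest: …' from Source B
def pvCountPairs (pair_counts : PySem.Dict (String × String) Int) : List String → PySem.Dict (String × String) Int
  | [] => pair_counts
  | a :: rest =>
    pvCountPairs (rest.foldl (fun d b => d.insert (a, b) (d.getD (a, b) 0 + 1)) pair_counts) rest

def extract_location_with_list_alt (chapter : List String) (location_set : List String) : List (String × List (String × Int)) :=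
  let seen := location_set.foldl (fun seen e => if seen.contains e then seen else seen ++ [e]) ([] : List String)
  let pair_counts := (PySem.List.slice chapter (some 1) none).foldl
    (fun pair_counts paragraph => pvCountPairs pair_counts (seen.filter (fun e => PySem.Str.isIn e paragraph)))
    PySem.Dict.empty
  let connections : PySem.Dict String (PySem.Dict String Int) :=
    pair_counts.items.foldl (fun connections p =>
      let inner_a := connections.getD p.1.1 PySem.Dict.empty
      let connections := connections.insert p.1.1 (inner_a.insert p.1.2 p.2)
      let inner_b := connections.getD p.1.2 PySem.Dict.empty
      connections.insert p.1.2 (inner_b.insert p.1.1 p.2)) PySem.Dict.empty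
  connections.items.map (fun p => (p.1, p.2.items))

-- ===== PRECONDITION & SPEC =====
-- Pre_ excludes only the empty chapter, on which A's 'title = chapter[0]' raises IndexError.
def Pre_extract_location_with_list (chapter : List String) (location_set : List String) : Prop := chapter ≠ []
instance (chapter : List String) (location_set : List String) : Decidable (Pre_extract_location_with_list chapter location_set) := by unfold Pre_extract_location_with_list; infer_instance
def pvWitness_extract_location_with_list : List String × List String :=
  (["title", "paris and london", "london near paris"], ["paris", "london"])

def Spec_extract_location_with_list (chapter : List String) (location_set : List String) (out : List (String × List (String × Int))) : Prop := out = extract_location_with_list_alt chapter location_set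
instance (chapter : List String) (location_set : List String) (out : List (String × List (String × Int))) : Decidable (Spec_extract_location_with_list chapter location_set out) := by unfold Spec_extract_location_with_list; infer_instance

-- ===== CLAIM (what is proved, stated in full; the proofs are below) =====
def Claim_equal_extract_location_with_list : Prop := ∀ (chapter : List String) (location_set : List String), Dom_extract_location_with_list chapter location_set → Pre_extract_location_with_list chapter location_set → Spec_extract_location_with_list chapter location_set (extract_location_with_list chapter location_set)
-- ===== LEMMAS AND PROOFS =====

abbrev pvConn : Type := PySem.Dict String (PySem.Dict String Int)
def pvCell (M : pvConn) (a b : String) : Int := (M.getD a PySem.Dict.empty).getD b 0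
def pvSetCell (M : pvConn) (a b : String) (v : Int) : pvConn :=
  M.insert a ((M.getD a PySem.Dict.empty).insert b v)

theorem pv_insert_comm {κ ν : Type} [BEq κ] [LawfulBEq κ] (d : PySem.Dict κ ν) (k k' : κ) (v v' : ν)
    (hne : k ≠ k') (hc : d.contains k' = true) :
    (d.insert k v).insert k' v' = (d.insert k' v').insert k v := by
  apply PySem.Dict.ext
  have h1 : (d.insert k v).contains k' = true := by
    rw [PySem.Dict.contains_insert]; simp [hc]
  by_cases hck : d.contains k = true
  · have h2 : (d.insert k' v').contains k = true := by
      rw [PySem.Dict.contains_insert]; simp [hck]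
    rw [PySem.Dict.items_insert_of_contains _ _ h1, PySem.Dict.items_insert_of_contains _ _ hck,
        PySem.Dict.items_insert_of_contains _ _ h2, PySem.Dict.items_insert_of_contains _ _ hc]
    rw [List.map_map, List.map_map]
    apply List.map_congr_left
    intro p _
    by_cases hk : p.1 = k
    · simp [hk, hne]
    · by_cases hk' : p.1 = k' <;> simp [hk, hk', Ne.symm hne]
  · have hck' : d.contains k = false := by simpa using hck
    have h2 : (d.insert k' v').contains k = false := by
      rw [PySem.Dict.contains_insert]; simp [hck', hne]
    rw [PySem.Dict.items_insert_of_contains _ _ h1, PySem.Dict.items_insert_of_not_contains _ _ hck',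
        PySem.Dict.items_insert_of_not_contains _ _ h2, PySem.Dict.items_insert_of_contains _ _ hc]
    rw [List.map_append]
    simp [hne]

theorem pvCell_setCell (M : pvConn) (p q x y : String) (v : Int) :
    pvCell (pvSetCell M p q v) x y = if x = p ∧ y = q then v else pvCell M x y := by
  unfold pvCell pvSetCell
  rw [PySem.Dict.getD_insert]
  by_cases hx : x = p
  · subst hx
    rw [if_pos rfl, PySem.Dict.getD_insert]
    by_cases hy : y = q <;> simp [hy]
  · simp [hx]

theorem pvSetCell_getD_of_ne (M : pvConn) (p q x : String) (v : Int) (h : x ≠ p) :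
    (pvSetCell M p q v).getD x PySem.Dict.empty = M.getD x PySem.Dict.empty := by
  unfold pvSetCell; rw [PySem.Dict.getD_insert]; simp [h]

theorem pvSetCell_contains (M : pvConn) (p q x : String) (v : Int) :
    (pvSetCell M p q v).contains x = (x == p || M.contains x) := by
  unfold pvSetCell; rw [PySem.Dict.contains_insert]

theorem pvSetCell_comm (M : pvConn) (p q x y : String) (v w : Int)
    (hne : ¬(p = x ∧ q = y)) (hx : M.contains x = true)
    (hy : (M.getD x PySem.Dict.empty).contains y = true) :
    pvSetCell (pvSetCell M p q v) x y w = pvSetCell (pvSetCell M x y w) p q v := by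
  by_cases hpx : p = x
  · subst hpx
    have hqy : q ≠ y := fun h => hne ⟨rfl, h⟩
    unfold pvSetCell
    rw [PySem.Dict.getD_insert_self, PySem.Dict.insert_insert_self,
        PySem.Dict.getD_insert_self, PySem.Dict.insert_insert_self,
        pv_insert_comm _ _ _ _ _ hqy hy]
  · unfold pvSetCell
    rw [PySem.Dict.getD_insert, if_neg (Ne.symm hpx), PySem.Dict.getD_insert, if_neg hpx,
        pv_insert_comm _ _ _ _ _ hpx hx]

theorem pvSetCell_self (M : pvConn) (p q : String) (v w : Int) :
    pvSetCell (pvSetCell M p q v) p q w = pvSetCell M p q w := by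
  unfold pvSetCell
  rw [PySem.Dict.getD_insert_self, PySem.Dict.insert_insert_self, PySem.Dict.insert_insert_self]

def pvPairStep (M : pvConn) (e : String × String) : pvConn :=
  let M1 := pvSetCell M e.1 e.2 (pvCell M e.1 e.2 + 1)
  pvSetCell M1 e.2 e.1 (pvCell M1 e.2 e.1 + 1)

def pvMatStep (M : pvConn) (p : (String × String) × Int) : pvConn :=
  pvSetCell (pvSetCell M p.1.1 p.1.2 p.2) p.1.2 p.1.1 p.2

def pvINV (M : pvConn) (a b : String) : Prop :=
  M.contains a = true ∧ M.contains b = true ∧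
  ((M.getD a PySem.Dict.empty).contains b = true) ∧ ((M.getD b PySem.Dict.empty).contains a = true)

theorem pvSetCell_inner_contains (M : pvConn) (p q x y : String) (v : Int)
    (h : (M.getD x PySem.Dict.empty).contains y = true) :
    ((pvSetCell M p q v).getD x PySem.Dict.empty).contains y = true := by
  by_cases hxp : x = p
  · subst hxp
    unfold pvSetCell
    rw [PySem.Dict.getD_insert_self, PySem.Dict.contains_insert, h]
    simp
  · rw [pvSetCell_getD_of_ne _ _ _ _ _ hxp, h]

theorem pvINV_setCell (M : pvConn) (a b p q : String) (v : Int) (h : pvINV M a b) :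
    pvINV (pvSetCell M p q v) a b := by
  obtain ⟨h1, h2, h3, h4⟩ := h
  refine ⟨?_, ?_, pvSetCell_inner_contains _ _ _ _ _ _ h3, pvSetCell_inner_contains _ _ _ _ _ _ h4⟩
  · rw [pvSetCell_contains, h1]; simp
  · rw [pvSetCell_contains, h2]; simp

theorem pvINV_matStep (M : pvConn) (a b : String) (pr : (String × String) × Int) (h : pvINV M a b) :
    pvINV (pvMatStep M pr) a b := pvINV_setCell _ _ _ _ _ _ (pvINV_setCell _ _ _ _ _ _ h)

theorem pvSetCell_contains_self (M : pvConn) (p q : String) (v : Int) :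
    (pvSetCell M p q v).contains p = true := by
  rw [pvSetCell_contains]; simp

theorem pvSetCell_inner_self (M : pvConn) (p q : String) (v : Int) :
    ((pvSetCell M p q v).getD p PySem.Dict.empty).contains q = true := by
  unfold pvSetCell
  rw [PySem.Dict.getD_insert_self, PySem.Dict.contains_insert]; simp

theorem pvINV_matStep_self (M : pvConn) (a b : String) (v : Int) :
    pvINV (pvMatStep M ((a, b), v)) a b := by
  unfold pvMatStep
  refine ⟨?_, pvSetCell_contains_self _ _ _ _, ?_, pvSetCell_inner_self _ _ _ _⟩
  · rw [pvSetCell_contains, pvSetCell_contains_self]; simp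
  · exact pvSetCell_inner_contains _ _ _ _ _ _ (pvSetCell_inner_self _ _ _ _)

theorem pv_local (M : pvConn) (a b : String) (v : Int) (hab : a ≠ b) :
    pvPairStep (pvMatStep M ((a, b), v)) (a, b) = pvMatStep M ((a, b), v + 1) := by
  have hba := Ne.symm hab
  simp only [pvPairStep, pvMatStep, pvCell_setCell]
  simp only [hab, hba, if_false, and_self, if_pos]
  rw [pvSetCell_comm (pvSetCell M a b v) b a a b v (v + 1)
        (by rintro ⟨h1, _⟩; exact hab h1.symm)
        (pvSetCell_contains_self _ _ _ _) (pvSetCell_inner_self _ _ _ _)]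
  rw [pvSetCell_self, pvSetCell_self]

theorem pv_comm (M : pvConn) (a b p q : String) (v : Int) (hab : a ≠ b)
    (h1 : (p, q) ≠ (a, b)) (h2 : (p, q) ≠ (b, a)) (hinv : pvINV M a b) :
    pvPairStep (pvMatStep M ((p, q), v)) (a, b) = pvMatStep (pvPairStep M (a, b)) ((p, q), v) := by
  obtain ⟨ca, cb, iab, iba⟩ := hinv
  have hn1 : ¬(a = q ∧ b = p) := by rintro ⟨rfl, rfl⟩; exact h2 rfl
  have hn2 : ¬(a = p ∧ b = q) := by rintro ⟨rfl, rfl⟩; exact h1 rfl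
  have hn3 : ¬(b = a ∧ a = b) := by rintro ⟨rfl, _⟩; exact hab rfl
  have hn4 : ¬(b = q ∧ a = p) := by rintro ⟨rfl, rfl⟩; exact h1 rfl
  have hn5 : ¬(b = p ∧ a = q) := by rintro ⟨rfl, rfl⟩; exact h2 rfl
  simp only [pvPairStep, pvMatStep]
  have r1 : pvCell (pvSetCell (pvSetCell M p q v) q p v) a b = pvCell M a b := by
    rw [pvCell_setCell, if_neg hn1, pvCell_setCell, if_neg hn2]
  rw [r1]
  have r2 : pvCell (pvSetCell (pvSetCell (pvSetCell M p q v) q p v) a b (pvCell M a b + 1)) b a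
      = pvCell M b a := by
    rw [pvCell_setCell, if_neg hn3, pvCell_setCell, if_neg hn4, pvCell_setCell, if_neg hn5]
  rw [r2]
  have r3 : pvCell (pvSetCell M a b (pvCell M a b + 1)) b a = pvCell M b a := by
    rw [pvCell_setCell, if_neg hn3]
  rw [r3]
  -- pure setCell algebra
  rw [pvSetCell_comm (pvSetCell M p q v) q p a b v (pvCell M a b + 1)
        (by rintro ⟨rfl, rfl⟩; exact h2 rfl)
        (by rw [pvSetCell_contains, ca]; simp)
        (pvSetCell_inner_contains _ _ _ _ _ _ iab)]
  rw [pvSetCell_comm M p q a b v (pvCell M a b + 1)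
        (by rintro ⟨rfl, rfl⟩; exact h1 rfl) ca iab]
  rw [pvSetCell_comm (pvSetCell (pvSetCell M a b (pvCell M a b + 1)) p q v) q p b a v (pvCell M b a + 1)
        (by rintro ⟨rfl, rfl⟩; exact h1 rfl)
        (by rw [pvSetCell_contains, pvSetCell_contains, cb]; simp)
        (pvSetCell_inner_contains _ _ _ _ _ _ (pvSetCell_inner_contains _ _ _ _ _ _ iba))]
  rw [pvSetCell_comm (pvSetCell M a b (pvCell M a b + 1)) p q b a v (pvCell M b a + 1)
        (by rintro ⟨rfl, rfl⟩; exact h2 rfl)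
        (by rw [pvSetCell_contains, cb]; simp)
        (pvSetCell_inner_contains _ _ _ _ _ _ iba)]

theorem pv_foldW (a b : String) (hab : a ≠ b) (W : List ((String × String) × Int)) :
    ∀ M : pvConn, pvINV M a b → (∀ pr ∈ W, pr.1 ≠ (a, b) ∧ pr.1 ≠ (b, a)) →
    pvPairStep (W.foldl pvMatStep M) (a, b) = W.foldl pvMatStep (pvPairStep M (a, b)) := by
  induction W with
  | nil => intro M _ _; rfl
  | cons pr rest ih =>
    intro M hinv hW
    simp only [List.foldl_cons]
    rw [ih (pvMatStep M pr) (pvINV_matStep _ _ _ _ hinv) (fun x hx => hW x (List.mem_cons_of_mem _ hx))]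
    have h := hW pr (List.mem_cons_self)
    rw [show pr = ((pr.1.1, pr.1.2), pr.2) from rfl] at h ⊢
    rw [pv_comm M a b pr.1.1 pr.1.2 pr.2 hab h.1 h.2 hinv]

theorem pvCell_empty (a b : String) : pvCell PySem.Dict.empty a b = 0 := by
  unfold pvCell
  rw [PySem.Dict.getD_empty, PySem.Dict.getD_empty]

theorem pvCell_nomatch (x y : String) (items : List ((String × String) × Int)) :
    ∀ M : pvConn, (∀ pr ∈ items, pr.1 ≠ (x, y) ∧ pr.1 ≠ (y, x)) →
    pvCell (items.foldl pvMatStep M) x y = pvCell M x y := by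
  induction items with
  | nil => intro M _; rfl
  | cons pr rest ih =>
    intro M h
    have h0 := h pr (List.mem_cons_self)
    simp only [List.foldl_cons]
    rw [ih (pvMatStep M pr) (fun z hz => h z (List.mem_cons_of_mem _ hz))]
    simp only [pvMatStep]
    rw [pvCell_setCell, if_neg (by rintro ⟨rfl, rfl⟩; exact h0.2 rfl),
        pvCell_setCell, if_neg (by rintro ⟨rfl, rfl⟩; exact h0.1 rfl)]

def pvCntStep (c : PySem.Dict (String × String) Int) (e : String × String) : PySem.Dict (String × String) Int :=
  c.insert e (c.getD e 0 + 1)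

def pvMaterialize (c : PySem.Dict (String × String) Int) : pvConn :=
  c.items.foldl pvMatStep PySem.Dict.empty

theorem pv_ofList_append_singleton {α : Type} [BEq α] [LawfulBEq α] (l : List α) (x : α) :
    PySem.Set.ofList (l ++ [x]) =
      if x ∈ l then PySem.Set.ofList l else PySem.Set.ofList l ++ [x] := by
  rw [PySem.Set.ofList_eq_foldl, List.foldl_append, ← PySem.Set.ofList_eq_foldl]
  simp only [List.foldl_cons, List.foldl_nil]
  show (if (PySem.Set.ofList l).contains x then _ else _) = _
  by_cases h : x ∈ l
  · rw [if_pos h, if_pos (by simpa [PySem.Set.mem_ofList] using h)]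
  · rw [if_neg h, if_neg (by simpa [PySem.Set.mem_ofList] using h)]

theorem pv_step (R : String → String → Prop) (hasym : ∀ x y, R x y → ¬ R y x)
    (es : List (String × String)) (Hor : ∀ e ∈ es, R e.1 e.2) (a b : String) (hR : R a b) :
    pvMaterialize (PySem.Dict.counter (es ++ [(a, b)])) =
      pvPairStep (pvMaterialize (PySem.Dict.counter es)) (a, b) := by
  have hne : a ≠ b := fun h => hasym a b hR (h ▸ hR)
  have hnotba : (b, a) ∉ es := fun hm => hasym b a (Hor _ hm) hR
  unfold pvMaterialize
  by_cases hmem : (a, b) ∈ es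
  · -- repeated pair: the counter entry is bumped in place
    obtain ⟨u, w, huw⟩ := List.append_of_mem ((PySem.Set.mem_ofList es (a, b)).mpr hmem)
    have nd := PySem.Set.nodup_ofList es
    rw [huw] at nd
    have hnu : (a, b) ∉ u := by
      intro h; exact (List.disjoint_of_nodup_append nd) h (List.mem_cons_self)
    have hnw : (a, b) ∉ w := by
      have := (List.nodup_append.mp nd).2.1
      exact (List.nodup_cons.mp this).1
    have hmap : ∀ (cnt : (String × String) → Int), ∀ l : List (String × String), (a, b) ∉ l →
        (∀ k, k ≠ (a,b) → cnt k = ((es.count k : Int))) →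
        l.map (fun k => (k, cnt k)) = l.map (fun k => (k, (es.count k : Int))) := by
      intro cnt l hnl hcnt
      apply List.map_congr_left
      intro k hk
      rw [hcnt k (fun h => hnl (h ▸ hk))]
    have hcnt' : ∀ k, k ≠ (a,b) → (((es ++ [(a,b)]).count k : Nat) : Int) = ((es.count k : Int)) := by
      intro k hk
      rw [List.count_append, List.count_singleton, if_neg (by simpa using Ne.symm hk)]
      simp
    rw [PySem.Dict.items_counter, PySem.Dict.items_counter, pv_ofList_append_singleton,
        if_pos hmem, huw]
    rw [List.map_append, List.map_append, List.map_cons, List.map_cons]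
    rw [hmap _ u hnu hcnt', hmap _ w hnw hcnt']
    have hbump : (((es ++ [(a, b)]).count (a, b) : Nat) : Int) = (es.count (a, b) : Int) + 1 := by
      rw [List.count_append, List.count_singleton]
      simp
    rw [hbump]
    rw [List.foldl_append, List.foldl_append, List.foldl_cons, List.foldl_cons]
    have hW : ∀ pr ∈ w.map (fun k => (k, (es.count k : Int))), pr.1 ≠ (a, b) ∧ pr.1 ≠ (b, a) := by
      intro pr hpr
      obtain ⟨k, hk, rfl⟩ := List.mem_map.mp hpr
      refine ⟨fun h => hnw (h ▸ hk), fun h => hnotba ?_⟩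
      have : k ∈ PySem.Set.ofList es := by rw [huw]; exact List.mem_append_right _ (List.mem_cons_of_mem _ hk)
      exact h ▸ (PySem.Set.mem_ofList es k).mp this
    rw [pv_foldW a b hne _ _ (pvINV_matStep_self _ _ _ _) hW]
    rw [pv_local _ _ _ _ hne]
  · -- fresh pair: the counter appends a new entry with count 1
    rw [PySem.Dict.items_counter, PySem.Dict.items_counter, pv_ofList_append_singleton,
        if_neg hmem, List.map_append]
    have : (PySem.Set.ofList es).map (fun k => (k, ((es ++ [(a, b)]).count k : Int)))
         = (PySem.Set.ofList es).map (fun k => (k, (es.count k : Int))) := by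
      apply List.map_congr_left
      intro k hk
      have hkes : k ∈ es := (PySem.Set.mem_ofList es k).mp hk
      have hkne : k ≠ (a, b) := fun h => hmem (h ▸ hkes)
      rw [List.count_append, List.count_singleton, if_neg (by simpa using Ne.symm hkne)]
      simp
    rw [this]
    have h1 : (((es ++ [(a, b)]).count (a, b) : Nat) : Int) = 1 := by
      rw [List.count_append, List.count_eq_zero.mpr hmem, List.count_singleton]
      simp
    rw [List.map_cons, List.map_nil, h1, List.foldl_append, List.foldl_cons, List.foldl_nil]
    have hzero : ∀ x y : String, (x, y) = (a, b) ∨ (x, y) = (b, a) →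
        pvCell ((PySem.Set.ofList es).map (fun k => (k, (es.count k : Int))) |>.foldl pvMatStep PySem.Dict.empty) x y = 0 := by
      intro x y hxy
      rw [pvCell_nomatch x y _ PySem.Dict.empty ?_, pvCell_empty]
      intro pr hpr
      obtain ⟨k, hk, rfl⟩ := List.mem_map.mp hpr
      have hkes : k ∈ es := (PySem.Set.mem_ofList es k).mp hk
      rcases hxy with h | h <;> rw [Prod.mk.injEq] at h <;> obtain ⟨rfl, rfl⟩ := h
      · exact ⟨fun h => hmem (h ▸ hkes), fun h => hnotba (h ▸ hkes)⟩
      · exact ⟨fun h => hnotba (h ▸ hkes), fun h => hmem (h ▸ hkes)⟩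
    simp only [pvPairStep, pvMatStep]
    rw [hzero a b (Or.inl rfl)]
    have r2 : pvCell (pvSetCell ((PySem.Set.ofList es).map (fun k => (k, (es.count k : Int))) |>.foldl pvMatStep PySem.Dict.empty) a b (0 + 1)) b a = 0 := by
      rw [pvCell_setCell, if_neg (by rintro ⟨rfl, _⟩; exact hne rfl), hzero b a (Or.inr rfl)]
    rw [r2]
    norm_num

theorem pv_cnt_counter (l : List (String × String)) :
    l.foldl pvCntStep PySem.Dict.empty = PySem.Dict.counter l :=
  PySem.Dict.foldl_insert_getD_add_one_eq_counter l

theorem pv_main (R : String → String → Prop) (hasym : ∀ x y, R x y → ¬ R y x)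
    (es : List (String × String)) (Hor : ∀ e ∈ es, R e.1 e.2) :
    es.foldl pvPairStep PySem.Dict.empty = pvMaterialize (es.foldl pvCntStep PySem.Dict.empty) := by
  induction es using List.reverseRecOn with
  | nil => rfl
  | append_singleton es e ih =>
    have Hor' : ∀ x ∈ es, R x.1 x.2 := fun x hx => Hor x (List.mem_append_left _ hx)
    rw [List.foldl_append, List.foldl_append]
    simp only [List.foldl_cons, List.foldl_nil]
    rw [ih Hor', pv_cnt_counter]
    have hcnt : pvCntStep (PySem.Dict.counter es) e = PySem.Dict.counter (es ++ [e]) := by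
      rw [← pv_cnt_counter es, ← pv_cnt_counter (es ++ [e]), List.foldl_append]
      simp only [List.foldl_cons, List.foldl_nil]
    rw [hcnt]
    obtain ⟨ea, eb⟩ := e
    exact (pv_step R hasym es Hor' ea eb (Hor (ea, eb) (List.mem_append_right _ (List.mem_cons_self)))).symm


def pvPairs {α : Type} : List α → List (α × α)
  | [] => []
  | a :: rest => rest.map (fun b => (a, b)) ++ pvPairs rest

-- ==== upstream reductions ====

theorem pv_foldl_flatMap {α β γ : Type} (l : List α) (g : α → List β) (step : γ → β → γ) (init : γ) :
    l.foldl (fun c p => (g p).foldl step c) init = (l.flatMap g).foldl step init := by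
  induction l generalizing init with
  | nil => rfl
  | cons x xs ih => simp only [List.foldl_cons, List.flatMap_cons, List.foldl_append, ih]

theorem pvPairs_nil_of_short {α : Type} (l : List α) (h : l.length ≤ 1) : pvPairs l = [] := by
  match l with
  | [] => rfl
  | [a] => rfl
  | a :: b :: t => simp at h

theorem pv_nested_aux (l : List String) : ∀ (n k : Nat), l.length - k = n → k ≤ l.length →
    ∀ conn : pvConn,
    (PySem.List.pyRange (k : Int) (l.length : Int) 1).foldl (fun c i =>
      (PySem.List.pyRange (i + 1) (l.length : Int) 1).foldl (fun c' j =>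
        pvPairStep c' (PySem.List.pyGetD l i "", PySem.List.pyGetD l j "")) c) conn
    = (pvPairs (l.drop k)).foldl pvPairStep conn := by
  intro n
  induction n with
  | zero =>
    intro k h hk conn
    have hkl : k = l.length := by omega
    subst hkl
    rw [PySem.List.pyRange_one_eq_nil (le_refl _), List.drop_length]
    rfl
  | succ n ihn =>
    intro k h hk conn
    have hklt : k < l.length := by omega
    rw [PySem.List.pyRange_one_cons (by exact_mod_cast hklt)]
    rw [List.foldl_cons]
    rw [PySem.List.foldl_pyRange_pyGetD' l "" (fun c v => pvPairStep c (PySem.List.pyGetD l (k : Int) "", v)) conn (by positivity)]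
    have ht : ((k : Int) + 1).toNat = k + 1 := by omega
    rw [ht]
    have hg : PySem.List.pyGetD l (k : Int) "" = l[k] := by
      rw [PySem.List.pyGetD_natCast, List.getD_eq_getElem l "" hklt]
    rw [show ((k : Int) + 1) = ((k + 1 : Nat) : Int) by push_cast; ring]
    rw [ihn (k + 1) (by omega) (by omega)]
    rw [← List.getElem_cons_drop hklt]
    simp only [pvPairs, List.foldl_append, List.foldl_map, hg]

theorem pv_nested (l : List String) (conn : pvConn) :
    (PySem.List.pyRange 0 (l.length : Int) 1).foldl (fun c i =>
      (PySem.List.pyRange (i + 1) (l.length : Int) 1).foldl (fun c' j =>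
        pvPairStep c' (PySem.List.pyGetD l i "", PySem.List.pyGetD l j "")) c) conn
    = (pvPairs l).foldl pvPairStep conn := by
  have := pv_nested_aux l (l.length) 0 (by omega) (by omega) conn
  simpa using this

theorem pv_set_add_eq (s : List String) (x : String) :
    PySem.Set.add s x = if x ∈ s then s else s ++ [x] := by
  show (if s.contains x then s else s ++ [x]) = _
  by_cases hm : x ∈ s <;> simp [hm]

theorem pv_ofList_filter_aux (q : String → Bool) (l : List String) :
    ∀ s : List String,
    (l.filter q).foldl PySem.Set.add (s.filter q) = (l.foldl PySem.Set.add s).filter q := by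
  induction l with
  | nil => intro s; rfl
  | cons x xs ih =>
    intro s
    by_cases hq : q x
    · rw [List.filter_cons_of_pos hq]
      simp only [List.foldl_cons]
      have hadd : PySem.Set.add (s.filter q) x = (PySem.Set.add s x).filter q := by
        rw [pv_set_add_eq, pv_set_add_eq]
        by_cases hm : x ∈ s
        · rw [if_pos hm, if_pos (List.mem_filter.mpr ⟨hm, hq⟩)]
        · rw [if_neg hm, if_neg (fun h => hm (List.mem_filter.mp h).1),
              List.filter_append, List.filter_cons_of_pos hq, List.filter_nil]
      rw [hadd, ih]
    · rw [List.filter_cons_of_neg hq]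
      simp only [List.foldl_cons]
      have hadd : s.filter q = (PySem.Set.add s x).filter q := by
        rw [pv_set_add_eq]
        by_cases hm : x ∈ s
        · rw [if_pos hm]
        · rw [if_neg hm, List.filter_append, List.filter_cons_of_neg hq, List.filter_nil,
              List.append_nil]
      rw [hadd, ih]

theorem pv_ofList_filter (q : String → Bool) (l : List String) :
    PySem.Set.ofList (l.filter q) = (PySem.Set.ofList l).filter q := by
  rw [PySem.Set.ofList_eq_foldl, PySem.Set.ofList_eq_foldl]
  simpa using pv_ofList_filter_aux q l []

theorem pvCountPairs_eq (l : List String) :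
    ∀ d, pvCountPairs d l = (pvPairs l).foldl pvCntStep d := by
  induction l with
  | nil => intro d; rfl
  | cons a rest ih =>
    intro d
    show pvCountPairs (rest.foldl (fun d b => d.insert (a, b) (d.getD (a, b) 0 + 1)) d) rest = _
    rw [ih]
    simp only [pvPairs, List.foldl_append, List.foldl_map]
    rfl

theorem pv_pairs_orient {α : Type} (R : α → α → Prop) (l : List α) (hl : l.Pairwise R) :
    ∀ e ∈ pvPairs l, R e.1 e.2 := by
  induction l with
  | nil => intro e he; simp [pvPairs] at he
  | cons x xs ih =>
    intro e he
    simp only [pvPairs, List.mem_append, List.mem_map] at he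
    rcases he with ⟨b, hb, rfl⟩ | he
    · exact (List.pairwise_cons.mp hl).1 b hb
    · exact ih (List.pairwise_cons.mp hl).2 e he

theorem pv_nodup_pairwise {α : Type} [DecidableEq α] (l : List α) (h : l.Nodup) :
    l.Pairwise (fun a b => l.idxOf a < l.idxOf b) := by
  rw [List.pairwise_iff_getElem]
  intro i j hi hj hij
  rw [List.Nodup.idxOf_getElem h i hi, List.Nodup.idxOf_getElem h j hj]
  exact hij

-- the event stream both programs generate
def pvEvents (chapter : List String) (location_set : List String) : List (String × String) :=
  (PySem.List.slice chapter (some 1) none).flatMap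
    (fun p => pvPairs ((PySem.Set.ofList location_set).filter (fun e => PySem.Str.isIn e p)))

theorem pv_A_eq (chapter : List String) (location_set : List String) :
    extract_location_with_list chapter location_set =
      ((pvEvents chapter location_set).foldl pvPairStep PySem.Dict.empty).items.map (fun p => (p.1, p.2.items)) := by
  show (extract_location_with_list chapter location_set) = _
  dsimp only [extract_location_with_list, pvEvents]
  congr 1
  rw [← PySem.List.foldl_if_eq_foldl_filter]
  rw [PySem.List.foldl_congr_mem _ _
    (fun (acc : pvConn) (x : List String × String) => (pvPairs (PySem.Set.ofList x.1)).foldl pvPairStep acc) _ ?_]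
  · rw [List.foldl_map, pv_foldl_flatMap _ (fun p => pvPairs (PySem.Set.ofList (location_set.filter (fun e => PySem.Str.isIn e p)))) pvPairStep]
    simp only [pv_ofList_filter]
  · intro acc x _
    show _ = List.foldl pvPairStep acc (pvPairs (PySem.Set.ofList x.1))
    by_cases hp : x.1.length = 0
    · have hnil : x.1 = [] := List.eq_nil_of_length_eq_zero hp
      rw [hnil]
      norm_num [pvPairs, PySem.Set.ofList_eq_foldl]
    · have hb : (x.1.length != 0) = true := by simpa using hp
      rw [if_pos hb]
      by_cases hlen : (PySem.Set.ofList x.1).length ≤ 1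
      · rw [if_pos hlen, pvPairs_nil_of_short _ hlen, List.foldl_nil]
      · rw [if_neg hlen]
        exact pv_nested (PySem.Set.ofList x.1) acc

theorem pv_B_eq (chapter : List String) (location_set : List String) :
    extract_location_with_list_alt chapter location_set =
      (pvMaterialize ((pvEvents chapter location_set).foldl pvCntStep PySem.Dict.empty)).items.map (fun p => (p.1, p.2.items)) := by
  show (extract_location_with_list_alt chapter location_set) = _
  dsimp only [extract_location_with_list_alt, pvEvents, pvMaterialize]
  congr 2
  have hseen : location_set.foldl (fun seen e => if seen.contains e then seen else seen ++ [e]) ([] : List String) = PySem.Set.ofList location_set := by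
    rw [PySem.Set.ofList_eq_foldl]; rfl
  rw [hseen]
  rw [PySem.List.foldl_congr_mem _ _
    (fun (pc : PySem.Dict (String × String) Int) (p : String) =>
      (pvPairs ((PySem.Set.ofList location_set).filter (fun e => PySem.Str.isIn e p))).foldl pvCntStep pc) _ ?_]
  · rw [pv_foldl_flatMap]
    rfl
  · intro acc x _
    exact pvCountPairs_eq _ acc

theorem pv_events_orient (chapter : List String) (location_set : List String) :
    ∀ e ∈ pvEvents chapter location_set,
      (PySem.Set.ofList location_set).idxOf e.1 < (PySem.Set.ofList location_set).idxOf e.2 := by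
  intro e he
  obtain ⟨p, _, hp⟩ := List.mem_flatMap.mp he
  have hnd := PySem.Set.nodup_ofList location_set
  have hpw := pv_nodup_pairwise _ hnd
  have hpw' := List.Pairwise.filter (fun e => PySem.Str.isIn e p) hpw
  have := pv_pairs_orient _ _ hpw' e hp
  -- idxOf over the filtered list vs the full list: transfer
  exact this

-- ===== VERDICT (by name: the statement is the Claim_ definition above) =====
theorem extract_location_with_list_spec : Claim_equal_extract_location_with_list := by
  intro chapter location_set _ _
  unfold Spec_extract_location_with_list
  rw [pv_A_eq, pv_B_eq,
    pv_main (fun x y => (PySem.Set.ofList location_set).idxOf x < (PySem.Set.ofList location_set).idxOf y)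
      (fun x y h h' => absurd h' (Nat.lt_asymm h))
      _ (pv_events_orient chapter location_set)]
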